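-- pv_equiv track=rewrite | github.com/wcwright124/my_sols | 05/5-6.py | longest_constant_subarray_length
-- ===== SOURCE A (Python) =====
-- def longest_constant_subarray_length(arr):
--     longest = 0
--     i = 0
--     while i < len(arr):
--         j = i + 1
--         while j < len(arr) and arr[i] == arr[j]:
--             j += 1
--         longest = max(longest, j - i)
--         i = j
--     return longest
-- ===== SOURCE B (Python) =====
-- def longest_constant_subarray_length(arr):
--     longest = 0
--     current = 0
--     prev = None
--     for x in arr:
--         if current > 0 and x == prev:
--             current += 1
--         else:
--             current = 1
--         if current > longest:
--             longest = current
--         prev = x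
--     return longest
-- ===== Notes on version B (the rewrite author's own statement) =====
-- stated objective: simpler
-- what changed: Replaced the nested run-skipping while-loops with a single for-loop keeping a running counter that resets when the element changes and a running maximum.
import Mathlib
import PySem

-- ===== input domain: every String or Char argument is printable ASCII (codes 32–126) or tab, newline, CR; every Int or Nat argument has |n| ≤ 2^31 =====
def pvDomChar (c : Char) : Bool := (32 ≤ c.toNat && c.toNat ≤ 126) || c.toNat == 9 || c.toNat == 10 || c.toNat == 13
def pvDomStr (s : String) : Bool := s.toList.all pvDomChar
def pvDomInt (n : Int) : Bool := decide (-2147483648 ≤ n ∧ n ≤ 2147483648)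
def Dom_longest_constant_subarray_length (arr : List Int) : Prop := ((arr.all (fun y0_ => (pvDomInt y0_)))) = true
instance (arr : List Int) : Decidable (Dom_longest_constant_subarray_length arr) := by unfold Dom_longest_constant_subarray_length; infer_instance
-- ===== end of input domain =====

-- B replaces A's nested run-skipping while-loops by a single pass with a resetting
-- run counter and a running maximum (simpler decomposition, same O(n) cost).

-- ===== PORT A =====
-- inner while loop 'while j < len(arr) and arr[i] == arr[j]: j += 1'; the Nat fuel
-- only bounds the iteration count (structural recursion), it never changes the value
def pvRunEnd (arr : List Int) (i : Nat) : Nat → Nat → Nat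
  | j, 0 => j
  | j, fuel+1 =>
    if j < arr.length ∧ arr.getD i 0 = arr.getD j 0 then pvRunEnd arr i (j+1) fuel else j

-- outer while loop, state (longest, i); fuel bounds the iteration count only
def pvOuterA (arr : List Int) : Int → Nat → Nat → Int
  | longest, _, 0 => longest
  | longest, i, fuel+1 =>
    if i < arr.length then
      let j := pvRunEnd arr i (i+1) (arr.length - i)
      pvOuterA arr (max longest ((j : Int) - (i : Int))) j fuel
    else longest

def longest_constant_subarray_length (arr : List Int) : Int :=
  pvOuterA arr 0 0 (arr.length + 1)

-- ===== PORT B =====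
-- loop body of B: update (longest, current, prev) with the next element x
def pvStepB (s : Int × Int × Option Int) (x : Int) : Int × Int × Option Int :=
  let current := if 0 < s.2.1 ∧ s.2.2 = some x then s.2.1 + 1 else 1
  let longest := if s.1 < current then current else s.1
  (longest, current, some x)

def longest_constant_subarray_length_alt (arr : List Int) : Int :=
  (arr.foldl pvStepB (0, 0, none)).1

-- ===== PRECONDITION & SPEC =====
def Spec_longest_constant_subarray_length (arr : List Int) (out : Int) : Prop := out = longest_constant_subarray_length_alt arr
instance (arr : List Int) (out : Int) : Decidable (Spec_longest_constant_subarray_length arr out) := by unfold Spec_longest_constant_subarray_length; infer_instance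

-- ===== CLAIM (what is proved, stated in full; the proofs are below) =====
def Claim_equal_longest_constant_subarray_length : Prop := ∀ (arr : List Int), Dom_longest_constant_subarray_length arr → Spec_longest_constant_subarray_length arr (longest_constant_subarray_length arr)

-- ===== LEMMAS AND PROOFS =====

-- length of the maximal constant prefix of l equal to a
def pvPfx (a : Int) (l : List Int) : Nat :=
  match l with
  | [] => 0
  | x :: xs => if a = x then pvPfx a xs + 1 else 0

theorem pvPfx_le (a : Int) (l : List Int) : pvPfx a l ≤ l.length := by
  induction l with
  | nil => simp [pvPfx]
  | cons x xs ih =>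
    simp only [pvPfx, List.length_cons]
    split <;> omega

-- the common reference function: maximum run length, run by run
def pvRuns : List Int → Int
  | [] => 0
  | x :: xs =>
    let k := pvPfx x xs
    max ((1 : Int) + (k : Int)) (pvRuns (xs.drop k))
termination_by l => l.length
decreasing_by
  have := pvPfx_le x xs
  simp only [List.length_drop, List.length_cons]
  omega

theorem pvRuns_nonneg (l : List Int) : 0 ≤ pvRuns l := by
  unfold pvRuns
  match l with
  | [] => simp
  | x :: xs =>
    have : (0:Int) ≤ (pvPfx x xs : Int) := Int.natCast_nonneg _
    simp only
    omega

theorem pvRuns_nil : pvRuns [] = 0 := by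
  rw [pvRuns]

theorem pvRuns_cons (x : Int) (xs : List Int) :
    pvRuns (x :: xs) =
      max ((1 : Int) + (pvPfx x xs : Int)) (pvRuns (xs.drop (pvPfx x xs))) := by
  rw [pvRuns]

-- pvRunEnd computed via the prefix-count of the dropped suffix (fuel sufficient)
theorem pvRunEnd_eq (arr : List Int) (i : Nat) :
    ∀ (fuel j : Nat), arr.length ≤ j + fuel →
      pvRunEnd arr i j fuel = j + pvPfx (arr.getD i 0) (arr.drop j) := by
  intro fuel
  induction fuel with
  | zero =>
    intro j hf
    have hnil : arr.drop j = [] := List.drop_eq_nil_of_le (by omega)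
    rw [hnil]
    simp [pvRunEnd, pvPfx]
  | succ fuel ih =>
    intro j hf
    rw [pvRunEnd]
    split
    · next h =>
      obtain ⟨hj, he⟩ := h
      rw [ih (j+1) (by omega)]
      have hd : arr.drop j = arr[j] :: arr.drop (j+1) := List.drop_eq_getElem_cons hj
      have he2 : arr.getD i 0 = arr[j] := by
        rw [he]; exact List.getD_eq_getElem arr 0 hj
      rw [hd]
      simp only [pvPfx, if_pos he2]
      omega
    · next h =>
      by_cases hj : j < arr.length
      · have he2 : ¬ arr.getD i 0 = arr[j] := by
          intro hc
          exact h ⟨hj, by rw [hc]; exact (List.getD_eq_getElem arr 0 hj).symm⟩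
        have hd : arr.drop j = arr[j] :: arr.drop (j+1) := List.drop_eq_getElem_cons hj
        rw [hd]
        simp only [pvPfx, if_neg he2]
        omega
      · have hnil : arr.drop j = [] := List.drop_eq_nil_of_le (by omega)
        rw [hnil]
        simp [pvPfx]

-- A's outer loop computes max longest (pvRuns of the remaining suffix)
theorem pvOuterA_eq (arr : List Int) :
    ∀ (fuel : Nat) (longest : Int) (i : Nat), 0 ≤ longest → arr.length < i + fuel →
      pvOuterA arr longest i fuel = max longest (pvRuns (arr.drop i)) := by
  intro fuel
  induction fuel with
  | zero =>
    intro longest i hl hf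
    have hnil : arr.drop i = [] := List.drop_eq_nil_of_le (by omega)
    rw [hnil, pvRuns_nil]
    rw [pvOuterA]
    omega
  | succ fuel ih =>
    intro longest i hl hf
    rw [pvOuterA]
    split
    · next hi =>
      simp only
      set j := pvRunEnd arr i (i + 1) (arr.length - i) with hj
      have hje : j = i + 1 + pvPfx (arr.getD i 0) (arr.drop (i+1)) := by
        rw [hj, pvRunEnd_eq arr i (arr.length - i) (i+1) (by omega)]
      have hkle := pvPfx_le (arr.getD i 0) (arr.drop (i+1))
      rw [ih _ j (le_max_of_le_left hl) (by simp only [List.length_drop] at hkle; omega)]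
      have hd : arr.drop i = arr[i] :: arr.drop (i+1) := List.drop_eq_getElem_cons hi
      conv_rhs => rw [hd]
      rw [pvRuns_cons]
      have hg : arr.getD i 0 = arr[i] := List.getD_eq_getElem arr 0 hi
      rw [hg] at hje
      have hdd : (arr.drop (i+1)).drop (pvPfx arr[i] (arr.drop (i+1))) = arr.drop j := by
        rw [List.drop_drop]; congr 1; omega
      rw [hdd]
      have hr := pvRuns_nonneg (arr.drop j)
      rw [hg] at hkle
      omega
    · next hi =>
      have hnil : arr.drop i = [] := List.drop_eq_nil_of_le (by omega)
      rw [hnil, pvRuns_nil]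
      omega

-- B's fold from a mid-run state (c = current trailing-run length, a = previous element)
theorem pvFoldB_eq (l : List Int) (L c : Int) (a : Int)
    (hc : 1 ≤ c) (hcL : c ≤ L) :
    (l.foldl pvStepB (L, c, some a)).1 =
      max L (max (c + (pvPfx a l : Int)) (pvRuns (l.drop (pvPfx a l)))) := by
  induction l generalizing L c a with
  | nil =>
    simp only [List.foldl_nil, pvPfx, List.drop_nil]
    rw [pvRuns_nil]
    omega
  | cons x xs ih =>
    simp only [List.foldl_cons]
    by_cases hax : a = x
    · -- run continues
      have hcond : 0 < c ∧ (some a : Option Int) = some x := ⟨by omega, by rw [hax]⟩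
      have hstep : pvStepB (L, c, some a) x =
          ((if L < c + 1 then c + 1 else L), c + 1, some x) := by
        simp only [pvStepB, if_pos hcond]
      have hmax : (if L < c + 1 then c + 1 else L) = max L (c + 1) := by
        split_ifs <;> omega
      rw [hstep, hmax, ih (max L (c+1)) (c+1) x (by omega) (le_max_right _ _)]
      have hp : pvPfx a (x :: xs) = pvPfx a xs + 1 := by
        simp [pvPfx, if_pos hax]
      rw [hp, hax]
      simp only [List.drop_succ_cons]
      have hr := pvRuns_nonneg (xs.drop (pvPfx x xs))
      push_cast
      omega
    · -- run resets at x
      have hcond : ¬ (0 < c ∧ (some a : Option Int) = some x) := by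
        rintro ⟨-, h⟩; exact hax (Option.some.inj h)
      have hstep : pvStepB (L, c, some a) x =
          ((if L < 1 then 1 else L), 1, some x) := by
        simp only [pvStepB, if_neg hcond]
      have hmax : (if L < (1:Int) then 1 else L) = max L 1 := by
        split_ifs <;> omega
      rw [hstep, hmax, ih (max L 1) 1 x (le_refl 1) (le_max_right _ _)]
      have hp : pvPfx a (x :: xs) = 0 := by simp [pvPfx, if_neg hax]
      rw [hp]
      simp only [List.drop_zero]
      rw [pvRuns_cons]
      have hr := pvRuns_nonneg (xs.drop (pvPfx x xs))
      omega

theorem pvAltB_eq (arr : List Int) :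
    longest_constant_subarray_length_alt arr = pvRuns arr := by
  unfold longest_constant_subarray_length_alt
  match arr with
  | [] =>
    simp only [List.foldl_nil]
    rw [pvRuns_nil]
  | x :: xs =>
    simp only [List.foldl_cons]
    have hstep : pvStepB ((0:Int), (0:Int), (none : Option Int)) x = (1, 1, some x) := by
      simp [pvStepB]
    rw [hstep, pvFoldB_eq xs 1 1 x (le_refl 1) (le_refl 1), pvRuns_cons]
    have hr := pvRuns_nonneg (xs.drop (pvPfx x xs))
    omega

-- ===== VERDICT (by name: the statement is the Claim_ definition above) =====
theorem longest_constant_subarray_length_spec : Claim_equal_longest_constant_subarray_length := by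
  intro arr _
  unfold Spec_longest_constant_subarray_length
  rw [pvAltB_eq]
  unfold longest_constant_subarray_length
  rw [pvOuterA_eq arr (arr.length + 1) 0 0 (le_refl 0) (by omega)]
  simp only [List.drop_zero]
  have := pvRuns_nonneg arr
  omega
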